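-- pv_equiv track=rewrite | github.com/TanmayKumar-EngStud/CryptographyPy | Classical Ciphers/Hill Cipher.py | generateTextMatrix
-- ===== SOURCE A (Python) =====
-- plainText = "ACT"
--
-- def generateTextMatrix(plainText, length = len(plainText)):
--     matrix = []
--     for i in range(length):
--         temp =[]
--         if i < len(plainText):
--             temp.append(ord(plainText[i].lower()) - 97)
--         else:
--             temp.append(ord('q') - 97)
--         matrix.append(temp)
--     return matrix
-- ===== SOURCE B (Python) =====
-- plainText = "ACT"
--
-- def generateTextMatrix(plainText, length = len(plainText)):
--     n = max(length, 0)
--     padded = (plainText.lower() + 'q' * (n - len(plainText)))[:n]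
--     return [[ord(c) - 97] for c in padded]
-- ===== Notes on version B (the rewrite author's own statement) =====
-- stated objective: simpler
-- what changed: Replaces the index loop with its per-element bounds check by a two-phase computation: first build the normalized fixed-length string (lowercase, pad with 'q', truncate), then one uniform map ord(c)-97 with no conditional.
import Mathlib
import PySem

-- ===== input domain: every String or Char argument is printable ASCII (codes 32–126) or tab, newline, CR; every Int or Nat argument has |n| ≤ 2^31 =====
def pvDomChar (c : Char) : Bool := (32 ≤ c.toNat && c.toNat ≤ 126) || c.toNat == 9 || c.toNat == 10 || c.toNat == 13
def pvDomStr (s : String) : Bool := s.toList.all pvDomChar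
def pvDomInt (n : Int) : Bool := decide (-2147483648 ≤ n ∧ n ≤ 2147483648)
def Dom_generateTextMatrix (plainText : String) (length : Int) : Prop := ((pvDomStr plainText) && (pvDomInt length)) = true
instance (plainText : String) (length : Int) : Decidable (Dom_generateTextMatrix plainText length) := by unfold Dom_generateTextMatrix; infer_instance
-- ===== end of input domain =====

-- B replaces A's index loop with a per-element bounds check by a two-phase computation
-- (build the lowercased, 'q'-padded, truncated string, then one uniform map); same cost, simpler shape.

-- ===== PORT A =====
-- for i in range(length): if i < len(plainText): …ord(plainText[i].lower())-97… else …ord('q')-97…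
-- the index i is always in range inside the taken branch, so pyGetD's default is never read
def generateTextMatrix (plainText : String) (length : Int) : List (List Int) :=
  (PySem.List.pyRange 0 length 1).foldl (fun matrix i =>
    let temp : List Int :=
      if i < PySem.Str.len plainText then
        [((PySem.Chars.lowerChar (PySem.List.pyGetD plainText.toList i 'q')).toNat : Int) - 97]
      else
        [(('q'.toNat : Int) - 97)]
    matrix ++ [temp]) []

-- ===== PORT B =====
-- n = max(length, 0); padded = (plainText.lower() + 'q'*(n-len(plainText)))[:n]; [[ord(c)-97] for c in padded]
-- 'q' * k with k < 0 is "" in Python, matched by Int.toNat clamping to 0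
def generateTextMatrix_alt (plainText : String) (length : Int) : List (List Int) :=
  let n : Int := max length 0
  let padded : List Char :=
    PySem.List.slice
      (PySem.Chars.lower plainText.toList ++
        List.replicate (n - PySem.Str.len plainText).toNat 'q')
      none (some n)
  padded.map (fun c => [((c.toNat : Int) - 97)])

-- ===== PRECONDITION & SPEC =====
def Spec_generateTextMatrix (plainText : String) (length : Int) (out : List (List Int)) : Prop := out = generateTextMatrix_alt plainText length
instance (plainText : String) (length : Int) (out : List (List Int)) : Decidable (Spec_generateTextMatrix plainText length out) := by unfold Spec_generateTextMatrix; infer_instance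

-- ===== CLAIM (what is proved, stated in full; the proofs are below) =====
def Claim_equal_generateTextMatrix : Prop := ∀ (plainText : String) (length : Int), Dom_generateTextMatrix plainText length → Spec_generateTextMatrix plainText length (generateTextMatrix plainText length)

-- ===== LEMMAS AND PROOFS =====

theorem padded_getElem (cs : List Char) (n : Int) (k : Nat)
    (hk : k < (PySem.Chars.lower cs ++ List.replicate (n - (cs.length : Int)).toNat 'q').length) :
    (PySem.Chars.lower cs ++ List.replicate (n - (cs.length : Int)).toNat 'q')[k] =
      if (k : Int) < (cs.length : Int) then PySem.Chars.lowerChar (cs.getD k 'q') else 'q' := by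
  have hlow : (PySem.Chars.lower cs).length = cs.length := by
    show (cs.map PySem.Chars.lowerChar).length = cs.length
    simp
  by_cases h : k < cs.length
  · rw [List.getElem_append_left (by omega),
      if_pos (show (k : Int) < (cs.length : Int) by exact_mod_cast h)]
    show (cs.map PySem.Chars.lowerChar)[k]'(by simpa using h) = _
    simp [List.getD, h]
  · rw [List.getElem_append_right (by omega),
      if_neg (show ¬ (k : Int) < (cs.length : Int) by exact_mod_cast h)]
    simp

-- ===== VERDICT (by name: the statement is the Claim_ definition above) =====
theorem generateTextMatrix_spec : Claim_equal_generateTextMatrix := by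
  intro plainText length _
  unfold Spec_generateTextMatrix generateTextMatrix generateTextMatrix_alt
  rw [PySem.List.foldl_append_singleton_eq_map]
  simp only [List.nil_append]
  set cs := plainText.toList with hcs
  set n : Int := max length 0 with hn
  have hn0 : 0 ≤ n := le_max_right _ _
  rw [PySem.List.slice_to _ hn0]
  have hlen : PySem.Str.len plainText = (cs.length : Int) := by
    simp [PySem.Str.len_eq, hcs]
  rw [hlen]
  -- both sides are maps over lists of the same length n.toNat
  apply List.ext_getElem
  · have hfulllen :
        (PySem.Chars.lower cs ++ List.replicate (n - (cs.length : Int)).toNat 'q').length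
          = cs.length + (n - (cs.length : Int)).toNat := by
      have hlow : (PySem.Chars.lower cs).length = cs.length := by
        show (cs.map PySem.Chars.lowerChar).length = cs.length
        simp
      rw [List.length_append, hlow, List.length_replicate]
    simp only [List.length_map, PySem.List.length_pyRange_one, List.length_take, hfulllen]
    omega
  · intro k h1 h2
    simp only [List.getElem_map, List.getElem_take]
    rw [PySem.List.getElem_pyRange_one 0 length k (by simpa using h1)]
    have hkn : (k : Int) < n := by
      have := h1
      simp only [List.length_map, PySem.List.length_pyRange_one] at this
      omega
    rw [padded_getElem cs n k (by
      simp only [List.length_map, List.length_take] at h2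
      omega)]
    simp only [zero_add]
    by_cases h : (k : Int) < (cs.length : Int)
    · rw [if_pos h, if_pos h, PySem.List.pyGetD_natCast]
    · rw [if_neg h, if_neg h]
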